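-- pv_equiv track=rewrite | github.com/shaharia-72/Code_Forces_Problem_Slove | Problem_sloved_with_Python-program/C_Good_Sequence.py | min_removal_to_make_good_sequence
-- ===== SOURCE A (Python) =====
-- def min_removal_to_make_good_sequence(N, a):
--     element_count = {}
--
--     for x in a:
--         if x in element_count:
--             element_count[x] += 1
--         else:
--             element_count[x] = 1
--
--     removals = 0
--
--     for x in element_count:
--         if element_count[x] > x:
--             removals += element_count[x] - x
--         elif element_count[x] < x:
--             removals += element_count[x]
--
--     return removals
-- ===== SOURCE B (Python) =====
-- def min_removal_to_make_good_sequence(N, a):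
--     s = sorted(a)
--     total = 0
--     i = 0
--     n = len(s)
--     while i < n:
--         x = s[i]
--         j = i + 1
--         while j < n and s[j] == x:
--             j += 1
--         cnt = j - i
--         if cnt > x:
--             total += cnt - x
--         elif cnt < x:
--             total += cnt
--         i = j
--     return total
-- ===== Notes on version B (the rewrite author's own statement) =====
-- stated objective: alternative
-- what changed: B replaces A's hash-map counting pass plus dict-iteration pass by sorting a copy of the list and scanning consecutive equal runs, applying the same per-value contribution to each run.
import Mathlib
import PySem

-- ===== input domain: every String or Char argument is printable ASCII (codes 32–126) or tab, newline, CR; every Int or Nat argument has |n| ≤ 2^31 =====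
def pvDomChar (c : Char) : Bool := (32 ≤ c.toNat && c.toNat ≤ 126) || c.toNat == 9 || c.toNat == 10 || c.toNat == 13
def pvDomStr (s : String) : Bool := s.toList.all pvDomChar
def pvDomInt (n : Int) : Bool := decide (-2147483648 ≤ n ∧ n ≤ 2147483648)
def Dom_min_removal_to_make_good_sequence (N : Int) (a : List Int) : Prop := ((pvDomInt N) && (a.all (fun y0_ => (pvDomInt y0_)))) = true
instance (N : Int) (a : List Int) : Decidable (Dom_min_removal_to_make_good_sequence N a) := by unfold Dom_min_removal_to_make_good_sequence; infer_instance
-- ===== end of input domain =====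

-- B sorts a copy of the list and scans consecutive equal runs instead of A's dict-counting pass
-- followed by a dict-iteration pass; the per-value contribution is the same, so the totals agree.

-- ===== PORT A =====
-- A's first loop: build the occurrence-count dict
def pvCountDict (a : List Int) : PySem.Dict Int Int :=
  a.foldl (fun d x =>
    if d.contains x then d.insert x (d.getD x 0 + 1) else d.insert x 1)
    PySem.Dict.empty

def min_removal_to_make_good_sequence (N : Int) (a : List Int) : Int :=
  let element_count := pvCountDict a
  element_count.keys.foldl (fun removals x =>
    if element_count.getD x 0 > x then removals + (element_count.getD x 0 - x)
    else if element_count.getD x 0 < x then removals + element_count.getD x 0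
    else removals) 0

-- ===== PORT B =====
-- B's outer while-loop: each step consumes one run of equal values from the sorted list.
def pvRunScan : List Int → Int
  | [] => 0
  | x :: t =>
    let cnt : Int := 1 + ((t.takeWhile (fun y => y == x)).length : Int)
    (if cnt > x then cnt - x else if cnt < x then cnt else 0)
      + pvRunScan (t.dropWhile (fun y => y == x))
termination_by l => l.length
decreasing_by simpa using Nat.lt_succ_of_le (List.length_dropWhile_le _ _)

def min_removal_to_make_good_sequence_alt (N : Int) (a : List Int) : Int :=
  pvRunScan (PySem.List.sorted a (fun x => x) false)

-- ===== PRECONDITION & SPEC =====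
def Spec_min_removal_to_make_good_sequence (N : Int) (a : List Int) (out : Int) : Prop := out = min_removal_to_make_good_sequence_alt N a
instance (N : Int) (a : List Int) (out : Int) : Decidable (Spec_min_removal_to_make_good_sequence N a out) := by unfold Spec_min_removal_to_make_good_sequence; infer_instance

-- ===== CLAIM (what is proved, stated in full; the proofs are below) =====
def Claim_equal_min_removal_to_make_good_sequence : Prop := ∀ (N : Int) (a : List Int), Dom_min_removal_to_make_good_sequence N a → Spec_min_removal_to_make_good_sequence N a (min_removal_to_make_good_sequence N a)

-- ===== LEMMAS AND PROOFS =====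

-- the common per-value contribution
def pvContrib (x c : Int) : Int := if c > x then c - x else if c < x then c else 0

-- the common canonical value: sum of contributions over the distinct elements
def pvF (l : List Int) : Int :=
  ((PySem.Set.ofList l).map (fun z => pvContrib z ((l.count z : Int)))).sum

lemma pvCountDict_eq_counter (a : List Int) : pvCountDict a = PySem.Dict.counter a := by
  unfold pvCountDict
  rw [PySem.List.foldl_congr_mem _ _ (fun d x => d.insert x (d.getD x 0 + 1)) _
      (by
        intro d x _
        by_cases h : d.contains x = true
        · simp [h]
        · simp only [Bool.not_eq_true] at h
          simp [h, PySem.Dict.getD_of_not_contains d 0 h])]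
  exact PySem.Dict.foldl_insert_getD_add_one_eq_counter a

lemma pvA_eq_F (N : Int) (a : List Int) : min_removal_to_make_good_sequence N a = pvF a := by
  show (pvCountDict a).keys.foldl _ 0 = pvF a
  rw [pvCountDict_eq_counter]
  rw [PySem.List.foldl_congr_mem _ _
      (fun removals x => removals + pvContrib x (((PySem.Dict.counter a).getD x 0)))
      _ (by
        intro acc x _
        simp only [pvContrib]
        split_ifs <;> simp)]
  rw [PySem.List.foldl_add]
  simp only [PySem.Dict.keys_counter, PySem.Dict.getD_counter, pvF, zero_add]

lemma pvFoldlAdd_skip (x : Int) : ∀ (l : List Int) (s : PySem.Set Int),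
    (∀ y ∈ l, y = x) → x ∈ s → l.foldl PySem.Set.add s = s := by
  intro l
  induction l with
  | nil => intro s _ _; rfl
  | cons y t ih =>
    intro s hall hx
    have hy : y = x := hall y (by simp)
    have hadd : PySem.Set.add s y = s := by simp [PySem.Set.add, hy, hx]
    rw [List.foldl_cons, hadd]
    exact ih s (fun z hz => hall z (List.mem_cons_of_mem _ hz)) hx

lemma pvFoldlAdd_cons (x : Int) : ∀ (l : List Int) (s : PySem.Set Int),
    x ∉ l → x ∉ s → l.foldl PySem.Set.add (x :: s) = x :: l.foldl PySem.Set.add s := by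
  intro l
  induction l with
  | nil => intro s _ _; rfl
  | cons y t ih =>
    intro s hl hs
    have hyx : y ≠ x := fun h => hl (by simp [h])
    have hcont : PySem.Set.contains (x :: s) y = PySem.Set.contains s y := by
      simp only [PySem.Set.contains]
      simp
      exact fun hEq => absurd hEq hyx
    have hadd : PySem.Set.add (x :: s) y = x :: PySem.Set.add s y := by
      simp only [PySem.Set.add, hcont]
      split <;> simp
    have hxadd : x ∉ PySem.Set.add s y := by
      intro hmem
      rcases (PySem.Set.mem_add s y x).mp hmem with h | h
      · exact hs h
      · exact hyx h.symm
    rw [List.foldl_cons, hadd, List.foldl_cons]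
    exact ih (PySem.Set.add s y) (fun h => hl (List.mem_cons_of_mem _ h)) hxadd

lemma pv_not_mem_dropWhile (x : Int) : ∀ (t : List Int),
    List.Pairwise (· ≤ ·) (x :: t) → x ∉ t.dropWhile (fun y => y == x) := by
  intro t
  induction t with
  | nil => intro _ h; simp at h
  | cons y t' ih =>
    intro hp hmem
    rcases List.pairwise_cons.mp hp with ⟨hxle, hp'⟩
    rcases List.pairwise_cons.mp hp' with ⟨hyle, hpt'⟩
    by_cases hyx : (y == x) = true
    · simp only [List.dropWhile_cons, hyx, if_true] at hmem
      exact ih (List.pairwise_cons.mpr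
        ⟨fun z hz => hxle z (List.mem_cons_of_mem _ hz), hpt'⟩) hmem
    · simp only [List.dropWhile_cons, hyx] at hmem
      have hyx' : y ≠ x := by simpa using hyx
      rcases List.mem_cons.mp hmem with h | h
      · exact hyx' h.symm
      · have h1 : x ≤ y := hxle y (List.mem_cons_self ..)
        have h2 : y ≤ x := hyle x h
        exact hyx' (le_antisymm h2 h1)

lemma pvRunScan_eq_F : ∀ (l : List Int), List.Pairwise (· ≤ ·) l → pvRunScan l = pvF l := by
  intro l
  induction l using pvRunScan.induct with
  | case1 => intro _; simp [pvRunScan, pvF, PySem.Set.ofList_eq_foldl]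
  | case2 x t ih =>
    intro hp
    have hxdrop : x ∉ t.dropWhile (fun y => y == x) := pv_not_mem_dropWhile x t hp
    have htake : ∀ y ∈ t.takeWhile (fun y => y == x), y = x := by
      intro y hy
      simpa using List.mem_takeWhile_imp hy
    have hpdrop : List.Pairwise (· ≤ ·) (t.dropWhile (fun y => y == x)) :=
      (List.pairwise_cons.mp hp).2.sublist (List.dropWhile_sublist _)
    have hsplit := List.takeWhile_append_dropWhile (p := fun y => y == x) (l := t)
    have hcount_split : ∀ z : Int, t.count z = (t.takeWhile (fun y => y == x)).count z
        + (t.dropWhile (fun y => y == x)).count z := by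
      intro z
      conv_lhs => rw [← hsplit]
      exact List.count_append ..
    -- count of x in the whole list is 1 + run length
    have hcount_x : (((x :: t).count x : Nat) : Int)
        = 1 + ((t.takeWhile (fun y => y == x)).length : Int) := by
      have h2 : (t.takeWhile (fun y => y == x)).count x
          = (t.takeWhile (fun y => y == x)).length :=
        List.count_eq_length.mpr (fun b hb => (htake b hb).symm)
      have h3 : (t.dropWhile (fun y => y == x)).count x = 0 :=
        List.count_eq_zero.mpr hxdrop
      rw [List.count_cons_self, hcount_split x, h2, h3]
      push_cast
      ring
    -- count of z ≠ x in the whole list equals its count in the dropped suffix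
    have hcount_z : ∀ z, z ≠ x →
        ((x :: t).count z) = (t.dropWhile (fun y => y == x)).count z := by
      intro z hz
      have h2 : (t.takeWhile (fun y => y == x)).count z = 0 :=
        List.count_eq_zero.mpr (fun hm => hz (htake z hm))
      have h4 : (x :: t).count z = t.count z := by
        simp [Ne.symm hz]
      rw [h4, hcount_split z, h2, Nat.zero_add]
    -- the distinct-element list of x :: t is x :: (distinct of the dropped suffix)
    have hset : PySem.Set.ofList (x :: t)
        = x :: PySem.Set.ofList (t.dropWhile (fun y => y == x)) := by
      have hofcons : PySem.Set.ofList (x :: t) = t.foldl PySem.Set.add [x] := by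
        simp [PySem.Set.ofList_eq_foldl, PySem.Set.add, PySem.Set.contains]
      rw [hofcons]
      conv_lhs => rw [← hsplit]
      rw [List.foldl_append,
          pvFoldlAdd_skip x (t.takeWhile (fun y => y == x)) [x] htake (by simp),
          show ([x] : PySem.Set Int) = x :: ([] : PySem.Set Int) from rfl,
          pvFoldlAdd_cons x _ [] hxdrop (by simp),
          PySem.Set.ofList_eq_foldl]
    simp only [pvRunScan]
    rw [ih hpdrop]
    simp only [pvF, hset, List.map_cons, List.sum_cons]
    congr 1
    · rw [hcount_x]
      simp [pvContrib]
    · congr 1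
      apply List.map_congr_left
      intro z hz
      have hzx : z ≠ x := by
        intro h; subst h
        exact hxdrop ((PySem.Set.mem_ofList _ z).mp hz)
      rw [hcount_z z hzx]

lemma pvF_sorted (a : List Int) : pvF (PySem.List.sorted a (fun x => x) false) = pvF a := by
  have hperm : (PySem.List.sorted a (fun x => x) false).Perm a := PySem.List.sorted_perm a _ _
  unfold pvF
  have hc : ∀ z, (PySem.List.sorted a (fun x => x) false).count z = a.count z :=
    fun z => hperm.count_eq z
  simp only [hc]
  exact List.Perm.sum_eq (List.Perm.map _
    ((List.perm_ext_iff_of_nodup (PySem.Set.nodup_ofList _) (PySem.Set.nodup_ofList _)).mpr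
      (fun z => by simp [PySem.Set.mem_ofList, hperm.mem_iff])))

-- ===== VERDICT (by name: the statement is the Claim_ definition above) =====
theorem min_removal_to_make_good_sequence_spec : Claim_equal_min_removal_to_make_good_sequence := by
  intro N a _
  unfold Spec_min_removal_to_make_good_sequence min_removal_to_make_good_sequence_alt
  rw [pvA_eq_F, pvRunScan_eq_F _ (by simpa using PySem.List.sorted_pairwise a (fun x => x)),
      pvF_sorted]
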